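-- pv_equiv track=rewrite | github.com/BlackRoad-OS/blackroad-os-operator | infra/math/golden_ratio.py | verify_zeckendorf
-- ===== SOURCE A (Python) =====
-- def verify_zeckendorf(representation: list[int]) -> bool:
--     """Check that a Zeckendorf representation is valid (non-consecutive Fibs)."""
--     # Get Fibonacci indices
--     fib_set = set()
--     a, b = 1, 2
--     idx = 2
--     while a <= max(representation) if representation else 0:
--         fib_set.add((a, idx))
--         a, b = b, a + b
--         idx += 1
--
--     # Check each pair
--     indices = []
--     for f in representation:
--         for fib, i in fib_set:
--             if fib == f:
--                 indices.append(i)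
--                 break
--
--     indices.sort()
--     for i in range(len(indices) - 1):
--         if indices[i + 1] - indices[i] == 1:
--             return False  # Consecutive!
--
--     return True
-- ===== SOURCE B (Python) =====
-- def verify_zeckendorf(representation: list[int]) -> bool:
--     """Check that a Zeckendorf representation is valid (non-consecutive Fibs)."""
--     if not representation:
--         return True
--     m = max(representation)
--     present = set(representation)
--     a, b = 1, 2
--     prev_in = False
--     while a <= m:
--         cur_in = a in present
--         if prev_in and cur_in:
--             return False  # two consecutive Fibonacci numbers used
--         prev_in = cur_in
--         a, b = b, a + b
--     return True
-- ===== Notes on version B (the rewrite author's own statement) =====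
-- stated objective: faster
-- what changed: B replaces A's per-element linear scan over the (fib,index) pair set plus sort of the collected indices plus adjacent-index scan with a single forward walk over the Fibonacci sequence that checks set membership of each consecutive Fibonacci pair, returning False on the first adjacent pair both present.
import Mathlib
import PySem

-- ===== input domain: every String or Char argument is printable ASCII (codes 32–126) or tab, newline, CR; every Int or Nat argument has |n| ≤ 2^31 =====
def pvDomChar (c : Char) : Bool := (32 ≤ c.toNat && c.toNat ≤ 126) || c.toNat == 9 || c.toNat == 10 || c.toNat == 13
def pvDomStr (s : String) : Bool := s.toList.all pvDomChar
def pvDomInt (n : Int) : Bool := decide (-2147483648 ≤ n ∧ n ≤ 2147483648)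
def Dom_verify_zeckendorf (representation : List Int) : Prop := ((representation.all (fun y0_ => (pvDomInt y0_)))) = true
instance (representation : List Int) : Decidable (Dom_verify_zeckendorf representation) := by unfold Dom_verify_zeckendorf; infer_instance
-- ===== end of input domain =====

-- B replaces A's (fib,index)-pair collection + sort + adjacent-index scan with one forward
-- walk over the Fibonacci sequence checking set membership of consecutive pairs (objective:
-- faster — the per-element scan and the sort disappear; measured faster in a timing run).

-- ===== PORT A =====

-- the `while a <= max(representation)` loop: builds fib_set (as a list in insertion order;
-- iteration order over the Python set cannot matter downstream because the fib values are
-- pairwise distinct, so at most one pair can match any f — proved in the lemmas below).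
-- The proof arguments 1 ≤ a < b are loop invariants, carried only to justify termination.
def fibBuild (m a b idx : Int) (acc : List (Int × Int)) (ha : 1 ≤ a) (hab : a < b) :
    List (Int × Int) :=
  if a ≤ m then
    fibBuild m b (a + b) (idx + 1) (acc ++ [(a, idx)]) (by omega) (by omega)
  else acc
termination_by (m + 1 - a).toNat
decreasing_by omega

-- the inner `for fib, i in fib_set: if fib == f: … break` loop: first matching pair
def lookupFib : List (Int × Int) → Int → Option Int
  | [], _ => none
  | (fib, i) :: rest, f => if fib == f then some i else lookupFib rest f

def verify_zeckendorf (representation : List Int) : Bool :=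
  -- `while a <= max(representation) if representation else 0`: on the empty list the
  -- conditional short-circuits to 0 (falsy) and the loop body never runs
  let fibSet : List (Int × Int) :=
    match PySem.List.max? representation (fun x => x) with
    | none => []
    | some mx => fibBuild mx 1 2 2 [] (by omega) (by omega)
  let indices : List Int :=
    representation.foldl (fun acc f =>
      match lookupFib fibSet f with
      | some i => acc ++ [i]
      | none => acc) []
  let sortedIdx := PySem.List.sorted indices (fun x => x) false
  (PySem.List.pyRange 0 ((sortedIdx.length : Int) - 1) 1).all (fun i =>
    !(PySem.List.pyGetD sortedIdx (i + 1) 0 - PySem.List.pyGetD sortedIdx i 0 == 1))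

-- ===== PORT B =====

-- the `while a <= m` walk of Source B; the proof arguments 1 ≤ a < b justify termination only
def bLoop (m a b : Int) (prevIn : Bool) (present : PySem.Set Int) (ha : 1 ≤ a) (hab : a < b) :
    Bool :=
  if a ≤ m then
    let curIn := PySem.Set.contains present a
    if prevIn && curIn then false
    else bLoop m b (a + b) curIn present (by omega) (by omega)
  else true
termination_by (m + 1 - a).toNat
decreasing_by omega

def verify_zeckendorf_alt (representation : List Int) : Bool :=
  match PySem.List.max? representation (fun x => x) with
  | none => true   -- `if not representation: return True`
  | some m => bLoop m 1 2 false (PySem.Set.ofList representation) (by omega) (by omega)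

-- ===== PRECONDITION & SPEC =====
def Spec_verify_zeckendorf (representation : List Int) (out : Bool) : Prop := out = verify_zeckendorf_alt representation
instance (representation : List Int) (out : Bool) : Decidable (Spec_verify_zeckendorf representation out) := by unfold Spec_verify_zeckendorf; infer_instance

-- ===== CLAIM (what is proved, stated in full; the proofs are below) =====
def Claim_equal_verify_zeckendorf : Prop := ∀ (representation : List Int), Dom_verify_zeckendorf representation → Spec_verify_zeckendorf representation (verify_zeckendorf representation)

-- ===== LEMMAS AND PROOFS =====

-- the values of the Fibonacci walk, as a plain list (proof-side device shared by both sides;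
-- the dite condition packages the loop invariant 1 ≤ a < b with the guard a ≤ m)
def chain (m a b : Int) : List Int :=
  if _h : 1 ≤ a ∧ a < b ∧ a ≤ m then a :: chain m b (a + b) else []
termination_by (m + 1 - a).toNat
decreasing_by omega

-- pair each element with its running index (proof-side image of fib_set)
def zipIdx2 : List Int → Int → List (Int × Int)
  | [], _ => []
  | x :: r, i => (x, i) :: zipIdx2 r (i + 1)

-- head of the chain is in the set (proof-side image of B's prev_in flag)
def headIn (s : PySem.Set Int) : List Int → Bool
  | x :: _ => PySem.Set.contains s x
  | [] => false

-- "some two adjacent elements of the list both occur in s"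
def hasAdjMem (s : PySem.Set Int) : List Int → Bool
  | x :: y :: r => (PySem.Set.contains s x && PySem.Set.contains s y) || hasAdjMem s (y :: r)
  | _ => false

theorem chain_cons (m a b : Int) (ha : 1 ≤ a) (hab : a < b) (h : a ≤ m) :
    chain m a b = a :: chain m b (a + b) := by
  rw [chain]; simp only [dif_pos (by omega : 1 ≤ a ∧ a < b ∧ a ≤ m)]

theorem chain_nil (m a b : Int) (h : ¬ a ≤ m) : chain m a b = [] := by
  rw [chain]; rw [dif_neg (by omega)]

theorem chain_mem_lb (m a b : Int) : ∀ x ∈ chain m a b, a ≤ x := by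
  fun_induction chain with
  | case1 a b h ih =>
    intro x hx
    rcases List.mem_cons.mp hx with rfl | hx
    · omega
    · have := ih x hx; omega
  | case2 a b h => intro x hx; simp at hx

theorem chain_pairwise (m a b : Int) : (chain m a b).Pairwise (· < ·) := by
  fun_induction chain with
  | case1 a b h ih =>
    refine List.pairwise_cons.mpr ⟨?_, ih⟩
    intro x hx
    have := chain_mem_lb m b (a + b) x hx
    omega
  | case2 a b h => simp

theorem fibBuild_eq (m a b idx : Int) (acc : List (Int × Int)) (ha : 1 ≤ a) (hab : a < b) :
    fibBuild m a b idx acc ha hab = acc ++ zipIdx2 (chain m a b) idx := by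
  fun_induction fibBuild with
  | case1 a b idx acc ha hab h ih =>
    rw [ih, chain_cons m a b ha hab h]
    simp [zipIdx2]
  | case2 a b idx acc ha hab h =>
    rw [chain_nil m a b h]
    simp [zipIdx2]

theorem lookupFib_zipIdx2 (c : List Int) (hc : c.Nodup) (i0 f v : Int) :
    lookupFib (zipIdx2 c i0) f = some v ↔
      ∃ p : Nat, getElem? c p = some f ∧ v = i0 + p := by
  induction c generalizing i0 with
  | nil => simp [zipIdx2, lookupFib]
  | cons x r ih =>
    rcases List.nodup_cons.mp hc with ⟨hxr, hr⟩
    simp only [zipIdx2, lookupFib]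
    by_cases hx : x = f
    · subst hx
      simp only [beq_self_eq_true, if_pos]
      constructor
      · rintro h
        refine ⟨0, by simp, ?_⟩
        simp at h; omega
      · rintro ⟨p, hp, hv⟩
        cases p with
        | zero => simp at hp hv ⊢; omega
        | succ q =>
          exfalso
          simp only [List.getElem?_cons_succ] at hp
          exact hxr (List.mem_of_getElem? hp)
    · rw [if_neg (by simpa using hx)]
      rw [ih hr (i0 + 1)]
      constructor
      · rintro ⟨p, hp, hv⟩
        refine ⟨p + 1, by simpa using hp, by push_cast; omega⟩
      · rintro ⟨p, hp, hv⟩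
        cases p with
        | zero => simp at hp; exact absurd hp hx
        | succ q =>
          refine ⟨q, by simpa using hp, ?_⟩
          push_cast at hv ⊢; omega

theorem hasAdjMem_iff (s : PySem.Set Int) (c : List Int) :
    hasAdjMem s c = true ↔
      ∃ (p : Nat) (x y : Int), getElem? c p = some x ∧ getElem? c (p + 1) = some y ∧
        x ∈ s ∧ y ∈ s := by
  induction c with
  | nil => simp [hasAdjMem]
  | cons x r ih =>
    cases r with
    | nil =>
      simp only [hasAdjMem]
      constructor
      · intro h; simp at h
      · rintro ⟨p, u, w, hu, hw, _⟩
        cases p <;> simp_all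
    | cons y t =>
      simp only [hasAdjMem, Bool.or_eq_true, Bool.and_eq_true, PySem.Set.contains_iff] at *
      constructor
      · rintro (⟨hx, hy⟩ | h)
        · exact ⟨0, x, y, rfl, rfl, hx, hy⟩
        · rcases ih.mp h with ⟨p, u, w, hu, hw, hus, hws⟩
          exact ⟨p + 1, u, w, by simpa using hu, by simpa using hw, hus, hws⟩
      · rintro ⟨p, u, w, hu, hw, hus, hws⟩
        cases p with
        | zero =>
          left
          simp only [zero_add, List.getElem?_cons_succ, List.getElem?_cons_zero,
            Option.some.injEq] at hu hw
          subst hu; subst hw; exact ⟨hus, hws⟩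
        | succ q =>
          right
          exact ih.mpr ⟨q, u, w, by simpa using hu, by simpa using hw, hus, hws⟩

theorem bLoop_char (m a b : Int) (prevIn : Bool) (s : PySem.Set Int) (ha : 1 ≤ a)
    (hab : a < b) :
    bLoop m a b prevIn s ha hab =
      !((prevIn && headIn s (chain m a b)) || hasAdjMem s (chain m a b)) := by
  fun_induction bLoop with
  | case1 a b prevIn ha hab h curIn hcur =>
    have hcu : curIn = PySem.Set.contains s a := rfl
    rw [hcu] at hcur
    rw [chain_cons m a b ha hab h]
    simp only [headIn]
    cases hc : PySem.Set.contains s a <;> rw [hc] at hcur <;> simp_all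
  | case2 a b prevIn ha hab h curIn hcur ih =>
    have hcu : curIn = PySem.Set.contains s a := rfl
    rw [hcu] at hcur ih ⊢
    rw [ih, chain_cons m a b ha hab h]
    simp only [headIn]
    rcases hrec : chain m b (a + b) with _ | ⟨y, r⟩ <;>
      simp only [hasAdjMem] <;>
      cases hc : PySem.Set.contains s a <;> rw [hc] at hcur <;> simp_all
  | case3 a b prevIn ha hab h =>
    rw [chain_nil m a b h]
    simp [headIn, hasAdjMem]

-- bridge: pyGetD at an in-range natural index is the optional index
theorem pyGetD_getElem? (l : List Int) (p : Nat) (hp : p < l.length) :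
    getElem? l p = some (PySem.List.pyGetD l (p : Int) 0) := by
  rw [PySem.List.pyGetD_eq_getElem l (i := (p : Int)) 0 (by omega) (by exact_mod_cast hp)]
  simp

-- structural reading of A's final index scan
theorem scan_all_iff (l : List Int) :
    ((PySem.List.pyRange 0 ((l.length : Int) - 1) 1).all (fun i =>
        !(PySem.List.pyGetD l (i + 1) 0 - PySem.List.pyGetD l i 0 == 1))) = true ↔
      ∀ (p : Nat) (u w : Int), getElem? l p = some u → getElem? l (p + 1) = some w →
        w - u ≠ 1 := by
  rw [List.all_eq_true]
  constructor
  · intro h p u w hu hw hd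
    have hp1 : p + 1 < l.length := (List.getElem?_eq_some_iff.mp hw).1
    have hm : (p : Int) ∈ PySem.List.pyRange 0 ((l.length : Int) - 1) 1 := by
      rw [PySem.List.mem_pyRange_one]; omega
    have := h _ hm
    simp only [Bool.not_eq_eq_eq_not, Bool.not_true, beq_eq_false_iff_ne] at this
    apply this
    have h0 := pyGetD_getElem? l p (by omega)
    have h1 := pyGetD_getElem? l (p + 1) hp1
    rw [hu] at h0; rw [hw] at h1
    have e0 : PySem.List.pyGetD l ((p : Int)) 0 = u := by simpa using h0.symm
    have e1 : PySem.List.pyGetD l ((p : Int) + 1) 0 = w := by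
      have : (((p + 1 : Nat)) : Int) = (p : Int) + 1 := by push_cast; ring
      rw [← this]; simpa using h1.symm
    rw [e0, e1, hd]
  · intro h i hi
    rw [PySem.List.mem_pyRange_one] at hi
    simp only [Bool.not_eq_eq_eq_not, Bool.not_true, beq_eq_false_iff_ne]
    intro hd
    have hp1 : i.toNat + 1 < l.length := by omega
    have e0 : ((i.toNat : Nat) : Int) = i := by omega
    have h0 := pyGetD_getElem? l i.toNat (by omega)
    have h1 := pyGetD_getElem? l (i.toNat + 1) hp1
    rw [e0] at h0
    have e1 : (((i.toNat + 1 : Nat)) : Int) = i + 1 := by push_cast; omega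
    rw [e1] at h1
    exact h i.toNat _ _ h0 h1 hd

-- in a ≤-sorted integer list, if v and v+1 both occur then some adjacent pair differs by 1
theorem sorted_pair_adj (l : List Int) (hs : l.Pairwise (· ≤ ·)) (v : Int)
    (hv : v ∈ l) (hv1 : v + 1 ∈ l) :
    ∃ (p : Nat) (u w : Int), getElem? l p = some u ∧ getElem? l (p + 1) = some w ∧
      w - u = 1 := by
  induction l with
  | nil => simp at hv
  | cons x xs ih =>
    rcases List.pairwise_cons.mp hs with ⟨hx, hxs⟩
    rcases List.mem_cons.mp hv with rfl | hvxs
    · have hv1xs : v + 1 ∈ xs := by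
        rcases List.mem_cons.mp hv1 with h | h
        · omega
        · exact h
      rcases xs with _ | ⟨y, t⟩
      · simp at hv1xs
      · have hy1 : v ≤ y := hx y List.mem_cons_self
        have hy2 : y ≤ v + 1 := by
          rcases List.mem_cons.mp hv1xs with rfl | hmem
          · omega
          · exact (List.pairwise_cons.mp hxs).1 _ hmem
        by_cases hyv : y = v + 1
        · exact ⟨0, v, y, rfl, rfl, by omega⟩
        · have hyv' : y = v := by omega
          have hvin : v ∈ y :: t := by rw [hyv']; exact List.mem_cons_self
          rcases ih hxs hvin hv1xs with ⟨p, u, w, hu, hw, hd⟩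
          exact ⟨p + 1, u, w, by simpa using hu, by simpa using hw, hd⟩
    · have hv1xs : v + 1 ∈ xs := by
        rcases List.mem_cons.mp hv1 with h | h
        · exfalso; have := hx v hvxs; omega
        · exact h
      rcases ih hxs hvxs hv1xs with ⟨p, u, w, hu, hw, hd⟩
      exact ⟨p + 1, u, w, by simpa using hu, by simpa using hw, hd⟩

-- A's foldl-with-append collection is a filterMap
theorem foldl_collect (g : Int → Option Int) (xs : List Int) (init : List Int) :
    xs.foldl (fun acc f => match g f with | some i => acc ++ [i] | none => acc) init =
      init ++ xs.filterMap g := by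
  induction xs generalizing init with
  | nil => simp
  | cons x r ih =>
    simp only [List.foldl_cons, List.filterMap_cons]
    cases g x <;> simp [ih]

-- ===== VERDICT (by name: the statement is the Claim_ definition above) =====
theorem verify_zeckendorf_spec : Claim_equal_verify_zeckendorf := by
  intro representation _
  unfold Spec_verify_zeckendorf verify_zeckendorf verify_zeckendorf_alt
  cases hmax : PySem.List.max? representation (fun x => x) with
  | none =>
    have hrep : representation = [] := (PySem.List.max?_eq_none_iff _ _).mp hmax
    subst hrep
    decide
  | some mx =>
    simp only
    set c := chain mx 1 2 with hc
    have hnd : c.Nodup := (chain_pairwise mx 1 2).nodup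
    rw [fibBuild_eq mx 1 2 2 [] (by omega) (by omega)]
    simp only [List.nil_append]
    rw [foldl_collect]
    simp only [List.nil_append]
    set I := representation.filterMap (fun f => lookupFib (zipIdx2 c 2) f) with hI
    set L := PySem.List.sorted I (fun x => x) false with hL
    rw [bLoop_char mx 1 2 false (PySem.Set.ofList representation) (by omega) (by omega)]
    simp only [Bool.false_and, Bool.false_or]
    set s := PySem.Set.ofList representation with hs
    have hsorted : L.Pairwise (· ≤ ·) := by
      have := PySem.List.sorted_pairwise I (fun x => x)
      simpa [hL] using this
    by_cases hbad : hasAdjMem s c = true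
    · rw [hbad]
      simp only [Bool.not_true]
      by_contra hne
      rw [Bool.not_eq_false] at hne
      rcases (hasAdjMem_iff s c).mp hbad with ⟨p, x, y, hx, hy, hxs, hys⟩
      have hxrep : x ∈ representation := (PySem.Set.mem_ofList _ _).mp hxs
      have hyrep : y ∈ representation := (PySem.Set.mem_ofList _ _).mp hys
      have hvx : ((2 : Int) + p) ∈ L := by
        rw [hL, PySem.List.mem_sorted, hI, List.mem_filterMap]
        exact ⟨x, hxrep, (lookupFib_zipIdx2 c hnd 2 x _).mpr ⟨p, hx, rfl⟩⟩
      have hvy : ((2 : Int) + p) + 1 ∈ L := by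
        rw [hL, PySem.List.mem_sorted, hI, List.mem_filterMap]
        refine ⟨y, hyrep, (lookupFib_zipIdx2 c hnd 2 y _).mpr ⟨p + 1, hy, by push_cast; ring⟩⟩
      rcases sorted_pair_adj L hsorted _ hvx hvy with ⟨q, u, w, hu, hw, hd⟩
      exact (scan_all_iff L).mp hne q u w hu hw hd
    · rw [Bool.not_eq_true] at hbad
      rw [hbad]
      simp only [Bool.not_false]
      rw [scan_all_iff]
      intro p u w hu hw hd
      have hvL : u ∈ L := List.mem_of_getElem? hu
      have hv1L : u + 1 ∈ L := by
        have : w = u + 1 := by omega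
        rw [← this]; exact List.mem_of_getElem? hw
      rw [hL, PySem.List.mem_sorted, hI, List.mem_filterMap] at hvL hv1L
      rcases hvL with ⟨x, hxrep, hxl⟩
      rcases hv1L with ⟨y, hyrep, hyl⟩
      rcases (lookupFib_zipIdx2 c hnd 2 x u).mp hxl with ⟨q, hq, hvq⟩
      rcases (lookupFib_zipIdx2 c hnd 2 y (u + 1)).mp hyl with ⟨q', hq', hvq'⟩
      have hq'' : q' = q + 1 := by omega
      subst hq''
      have : hasAdjMem s c = true :=
        (hasAdjMem_iff s c).mpr ⟨q, x, y, hq, hq',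
          (PySem.Set.mem_ofList _ _).mpr hxrep, (PySem.Set.mem_ofList _ _).mpr hyrep⟩
      rw [this] at hbad; exact Bool.noConfusion hbad
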